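-- pv_equiv track=rewrite | github.com/Ayushr1204/Revlytics | scripts/search.py | compute_product_sentiment
-- ===== SOURCE A (Python) =====
-- _POS_WORDS = {"good", "great", "best", "excellent", "strong", "impressive",
--               "reliable", "amazing", "outstanding", "solid", "long-lasting",
--               "smooth", "comfortable", "cool", "quiet", "stellar"}
--
-- _NEG_WORDS = {"bad", "poor", "worst", "terrible", "disappointing", "weak",
--               "drain", "overheat", "dealbreaker", "struggle", "barely",
--               "dies", "frustrating", "uncomfortable", "loud", "unpleasant",
--               "painful", "pitiful", "flimsy"}
--
-- def get_chunk_sentiment(text: str, rating: int) -> str: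
--     """Classify a single chunk — keywords first, rating fallback."""
--     words = set(text.lower().split())
--     has_neg = bool(words & _NEG_WORDS)
--     has_pos = bool(words & _POS_WORDS)
--
--     if has_neg and not has_pos:
--         return "negative"
--     if has_pos and not has_neg:
--         return "positive"
--     if has_neg and has_pos:
--         return "negative"        # negative takes priority
--
--     if rating <= 2:
--         return "negative"
--     if rating >= 4:
--         return "positive"
--     return "neutral"
--
-- def compute_product_sentiment(texts: list[str], ratings: list[int]) -> str:
--     """One vote per chunk → majority wins → single label per product."""
--     pos = neg = neu = 0
--     for txt, rat in zip(texts, ratings):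
--         s = get_chunk_sentiment(txt, rat)
--         if s == "positive":
--             pos += 1
--         elif s == "negative":
--             neg += 1
--         else:
--             neu += 1
--
--     if pos > neg:
--         return "positive"
--     if neg > pos:
--         return "negative"
--     return "neutral"
-- ===== SOURCE B (Python) =====
-- _POS_WORDS = {"good", "great", "best", "excellent", "strong", "impressive",
--               "reliable", "amazing", "outstanding", "solid", "long-lasting",
--               "smooth", "comfortable", "cool", "quiet", "stellar"}
--
-- _NEG_WORDS = {"bad", "poor", "worst", "terrible", "disappointing", "weak",
--               "drain", "overheat", "dealbreaker", "struggle", "barely",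
--               "dies", "frustrating", "uncomfortable", "loud", "unpleasant",
--               "painful", "pitiful", "flimsy"}
--
-- def _keyword_vote(text):
--     """Min-fold over the sentiment words of the chunk: -1 dominates +1; None = no keyword."""
--     kw = None
--     for w in text.lower().split():
--         if w in _NEG_WORDS:
--             kw = -1 if kw is None else min(kw, -1)
--         elif w in _POS_WORDS:
--             kw = 1 if kw is None else min(kw, 1)
--     return kw
--
-- def _chunk_vote(text, rating):
--     kw = _keyword_vote(text)
--     if kw is not None:
--         return kw
--     if rating <= 2:
--         return -1
--     if rating >= 4:
--         return 1
--     return 0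
--
-- def compute_product_sentiment(texts, ratings):
--     # Boyer-Moore-style pairwise cancellation: opposite votes annihilate on a
--     # stack; the survivors (if any) are all equal and decide the label.
--     stack = []
--     for txt, rat in zip(texts, ratings):
--         v = _chunk_vote(txt, rat)
--         if v == 0:
--             continue
--         if stack and stack[-1] != v:
--             stack.pop()
--         else:
--             stack.append(v)
--     if not stack:
--         return "neutral"
--     return "positive" if stack[-1] == 1 else "negative"
-- ===== Notes on version B (the rewrite author's own statement) =====
-- stated objective: alternative
-- what changed: B replaces A's three-counter tally and final count comparison by Boyer-Moore-style pairwise cancellation on a stack of signed votes (opposite votes annihilate, the survivors decide), and replaces the classifier's two set intersections and four-way branch by a single min-fold over the chunk's sentiment words (-1 dominates +1) with the rating fallback only when no keyword occurs.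
import Mathlib
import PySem

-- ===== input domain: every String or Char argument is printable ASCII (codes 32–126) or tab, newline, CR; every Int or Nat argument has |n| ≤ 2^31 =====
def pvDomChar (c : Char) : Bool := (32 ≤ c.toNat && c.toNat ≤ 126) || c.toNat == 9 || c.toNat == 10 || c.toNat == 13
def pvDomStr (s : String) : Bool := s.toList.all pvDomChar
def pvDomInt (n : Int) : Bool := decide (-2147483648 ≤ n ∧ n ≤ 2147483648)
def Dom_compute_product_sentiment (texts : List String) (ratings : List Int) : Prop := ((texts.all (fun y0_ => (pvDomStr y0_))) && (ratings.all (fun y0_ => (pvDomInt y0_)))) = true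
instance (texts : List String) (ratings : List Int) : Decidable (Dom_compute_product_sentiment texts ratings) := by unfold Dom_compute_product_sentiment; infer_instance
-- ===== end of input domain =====

-- B replaces A's three-counter tally by Boyer–Moore-style pairwise cancellation on a stack
-- of signed votes, and the classifier's two set intersections by one min-fold over the words.

-- ===== PORT A =====
def pvPosWords : PySem.Set String := PySem.Set.ofList
  ["good", "great", "best", "excellent", "strong", "impressive",
   "reliable", "amazing", "outstanding", "solid", "long-lasting",
   "smooth", "comfortable", "cool", "quiet", "stellar"]

def pvNegWords : PySem.Set String := PySem.Set.ofList
  ["bad", "poor", "worst", "terrible", "disappointing", "weak",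
   "drain", "overheat", "dealbreaker", "struggle", "barely",
   "dies", "frustrating", "uncomfortable", "loud", "unpleasant",
   "painful", "pitiful", "flimsy"]

def get_chunk_sentiment (text : String) (rating : Int) : String :=
  let words : PySem.Set String := PySem.Set.ofList (PySem.Str.split₀ (PySem.Str.lower text))
  let has_neg : Bool := !(PySem.Set.inter words pvNegWords).isEmpty
  let has_pos : Bool := !(PySem.Set.inter words pvPosWords).isEmpty
  if has_neg && !has_pos then "negative"
  else if has_pos && !has_neg then "positive"
  else if has_neg && has_pos then "negative"
  else if rating ≤ 2 then "negative"
  else if rating ≥ 4 then "positive"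
  else "neutral"

def compute_product_sentiment (texts : List String) (ratings : List Int) : String :=
  let acc := (texts.zip ratings).foldl
    (fun (acc : Int × Int × Int) tr =>
      let s := get_chunk_sentiment tr.1 tr.2
      if s == "positive" then (acc.1 + 1, acc.2.1, acc.2.2)
      else if s == "negative" then (acc.1, acc.2.1 + 1, acc.2.2)
      else (acc.1, acc.2.1, acc.2.2 + 1)) (0, 0, 0)
  if acc.1 > acc.2.1 then "positive"
  else if acc.2.1 > acc.1 then "negative"
  else "neutral"

-- ===== PORT B =====
def kwStep (acc : Option Int) (w : String) : Option Int :=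
  if PySem.Set.contains pvNegWords w then
    some (match acc with | none => -1 | some k => min k (-1))
  else if PySem.Set.contains pvPosWords w then
    some (match acc with | none => 1 | some k => min k 1)
  else acc

def keyword_vote (text : String) : Option Int :=
  (PySem.Str.split₀ (PySem.Str.lower text)).foldl kwStep none

def chunk_vote (text : String) (rating : Int) : Int :=
  match keyword_vote text with
  | some k => k
  | none => if rating ≤ 2 then -1 else if rating ≥ 4 then 1 else 0

-- Python list used as a stack (append/pop at the end) is ported with the head as the top.
def cancelStep (st : List Int) (v : Int) : List Int :=
  if v == 0 then st
  else match st with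
    | [] => [v]
    | top :: rest => if top != v then rest else v :: top :: rest

def compute_product_sentiment_alt (texts : List String) (ratings : List Int) : String :=
  let stack := (texts.zip ratings).foldl (fun st tr => cancelStep st (chunk_vote tr.1 tr.2)) []
  match stack with
  | [] => "neutral"
  | top :: _ => if top == 1 then "positive" else "negative"

-- ===== PRECONDITION & SPEC =====
def Spec_compute_product_sentiment (texts : List String) (ratings : List Int) (out : String) : Prop := out = compute_product_sentiment_alt texts ratings
instance (texts : List String) (ratings : List Int) (out : String) : Decidable (Spec_compute_product_sentiment texts ratings out) := by unfold Spec_compute_product_sentiment; infer_instance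

-- ===== CLAIM (what is proved, stated in full; the proofs are below) =====
def Claim_equal_compute_product_sentiment : Prop := ∀ (texts : List String) (ratings : List Int), Dom_compute_product_sentiment texts ratings → Spec_compute_product_sentiment texts ratings (compute_product_sentiment texts ratings)

-- ===== LEMMAS AND PROOFS =====

lemma inter_nonempty_any (ws : List String) (S : PySem.Set String) :
    (!(PySem.Set.inter (PySem.Set.ofList ws) S).isEmpty)
      = ws.any (fun w => PySem.Set.contains S w) := by
  rw [Bool.eq_iff_iff]
  simp [List.isEmpty_iff, List.eq_nil_iff_forall_not_mem, PySem.Set.mem_inter,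
        PySem.Set.mem_ofList, List.any_eq_true]

lemma kw_fold_negAcc (ws : List String) :
    ws.foldl kwStep (some (-1)) = some (-1) := by
  induction ws with
  | nil => rfl
  | cons w tl ih =>
      simp only [List.foldl_cons, kwStep]
      split_ifs <;> simpa using ih

lemma kw_fold_posAcc (ws : List String) :
    ws.foldl kwStep (some 1)
      = if ws.any (fun w => PySem.Set.contains pvNegWords w) then some (-1) else some 1 := by
  induction ws with
  | nil => rfl
  | cons w tl ih =>
      simp only [List.foldl_cons, List.any_cons, kwStep]
      by_cases hn : w ∈ pvNegWords
      · simp [hn, kw_fold_negAcc]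
      · by_cases hp : w ∈ pvPosWords <;> simp [hn, hp, ih]

lemma kw_fold_none (ws : List String) :
    ws.foldl kwStep none
      = if ws.any (fun w => PySem.Set.contains pvNegWords w) then some (-1)
        else if ws.any (fun w => PySem.Set.contains pvPosWords w) then some 1
        else none := by
  induction ws with
  | nil => rfl
  | cons w tl ih =>
      simp only [List.foldl_cons, List.any_cons, kwStep]
      by_cases hn : w ∈ pvNegWords
      · simp [hn, kw_fold_negAcc]
      · by_cases hp : w ∈ pvPosWords
        · simp [hn, hp, kw_fold_posAcc]
        · simp [hn, hp, ih]

lemma chunk_cases (t : String) (r : Int) :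
    (get_chunk_sentiment t r = "positive" ∧ chunk_vote t r = 1) ∨
    (get_chunk_sentiment t r = "negative" ∧ chunk_vote t r = -1) ∨
    (get_chunk_sentiment t r = "neutral" ∧ chunk_vote t r = 0) := by
  cases hn : (PySem.Str.split₀ (PySem.Str.lower t)).any (fun w => PySem.Set.contains pvNegWords w) <;>
  cases hp : (PySem.Str.split₀ (PySem.Str.lower t)).any (fun w => PySem.Set.contains pvPosWords w) <;>
    simp only [get_chunk_sentiment, chunk_vote, keyword_vote, kw_fold_none, inter_nonempty_any,
      hn, hp, Bool.not_true, Bool.not_false, Bool.and_true, Bool.and_false, Bool.true_and,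
      Bool.false_and, if_true, if_false, Bool.false_eq_true, reduceIte] <;>
    (try split_ifs) <;> simp

-- The stack after any prefix is a run of equal votes encoding the signed tally.
def sRep (d : Int) : List Int :=
  if 0 < d then List.replicate d.toNat 1 else List.replicate (-d).toNat (-1)

lemma sRep_pos (d : Int) (h : 0 < d) : sRep d = 1 :: sRep (d - 1) := by
  have hk : d.toNat = (d - 1).toNat + 1 := by omega
  unfold sRep
  rcases eq_or_lt_of_le (by omega : (0:Int) ≤ d - 1) with h1 | h1
  · rw [if_pos h, if_neg (by omega), hk, List.replicate_succ,
      show ((-(d - 1)).toNat) = (d - 1).toNat by omega]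
    simp [show (d - 1).toNat = 0 by omega]
  · rw [if_pos h, if_pos h1, hk, List.replicate_succ]

lemma sRep_neg (d : Int) (h : d < 0) : sRep d = -1 :: sRep (d + 1) := by
  have hk : (-d).toNat = (-(d + 1)).toNat + 1 := by omega
  unfold sRep
  rcases eq_or_lt_of_le (by omega : d + 1 ≤ 0) with h1 | h1
  · rw [if_neg (by omega), if_neg (by omega), hk, List.replicate_succ]
  · rw [if_neg (by omega), if_neg (by omega), hk, List.replicate_succ]

lemma cancelStep_sRep_pos (d : Int) : cancelStep (sRep d) 1 = sRep (d + 1) := by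
  rcases lt_trichotomy d 0 with h | h | h
  · rw [sRep_neg d h]
    simp [cancelStep]
  · subst h; rfl
  · rw [sRep_pos (d + 1) (by omega), show d + 1 - 1 = d by ring, sRep_pos d h]
    simp [cancelStep]

lemma cancelStep_sRep_neg (d : Int) : cancelStep (sRep d) (-1) = sRep (d - 1) := by
  rcases lt_trichotomy d 0 with h | h | h
  · rw [sRep_neg (d - 1) (by omega), show d - 1 + 1 = d by ring, sRep_neg d h]
    simp [cancelStep]
  · subst h; rfl
  · rw [sRep_pos d h]
    simp [cancelStep]

lemma fold_inv (l : List (String × Int)) :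
    ∀ (p n u : Int),
      (l.foldl (fun st tr => cancelStep st (chunk_vote tr.1 tr.2)) (sRep (p - n)))
        = sRep ((l.foldl (fun (acc : Int × Int × Int) tr =>
            let s := get_chunk_sentiment tr.1 tr.2
            if s == "positive" then (acc.1 + 1, acc.2.1, acc.2.2)
            else if s == "negative" then (acc.1, acc.2.1 + 1, acc.2.2)
            else (acc.1, acc.2.1, acc.2.2 + 1)) (p, n, u)).1
          - (l.foldl (fun (acc : Int × Int × Int) tr =>
            let s := get_chunk_sentiment tr.1 tr.2
            if s == "positive" then (acc.1 + 1, acc.2.1, acc.2.2)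
            else if s == "negative" then (acc.1, acc.2.1 + 1, acc.2.2)
            else (acc.1, acc.2.1, acc.2.2 + 1)) (p, n, u)).2.1) := by
  induction l with
  | nil => intro p n u; rfl
  | cons hd tl ih =>
      intro p n u
      simp only [List.foldl_cons]
      rcases chunk_cases hd.1 hd.2 with ⟨hs, hv⟩ | ⟨hs, hv⟩ | ⟨hs, hv⟩ <;>
        simp only [hs, hv, String.reduceBEq, if_true, if_false, reduceIte]
      · rw [cancelStep_sRep_pos, show p - n + 1 = (p + 1) - n by ring]; exact ih _ _ _
      · rw [cancelStep_sRep_neg, show p - n - 1 = p - (n + 1) by ring]; exact ih _ _ _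
      · rw [show cancelStep (sRep (p - n)) 0 = sRep (p - n) from rfl]; exact ih _ _ _

-- ===== VERDICT (by name: the statement is the Claim_ definition above) =====
theorem compute_product_sentiment_spec : Claim_equal_compute_product_sentiment := by
  intro texts ratings _
  unfold Spec_compute_product_sentiment compute_product_sentiment compute_product_sentiment_alt
  have h := fold_inv (texts.zip ratings) 0 0 0
  simp only [show (0:Int) - 0 = 0 by ring, show sRep 0 = [] from rfl] at h
  dsimp only
  rw [h]
  set P := ((texts.zip ratings).foldl (fun (acc : Int × Int × Int) tr =>
      let s := get_chunk_sentiment tr.1 tr.2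
      if s == "positive" then (acc.1 + 1, acc.2.1, acc.2.2)
      else if s == "negative" then (acc.1, acc.2.1 + 1, acc.2.2)
      else (acc.1, acc.2.1, acc.2.2 + 1)) (0, 0, 0)) with hP
  rcases lt_trichotomy P.1 P.2.1 with hlt | heq | hgt
  · rw [sRep_neg _ (by omega)]
    simp [show ¬ (P.1 > P.2.1) by omega, show P.2.1 > P.1 by omega]
  · rw [show sRep (P.1 - P.2.1) = [] by rw [show P.1 - P.2.1 = 0 by omega]; rfl]
    simp [show ¬ (P.1 > P.2.1) by omega, show ¬ (P.2.1 > P.1) by omega]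
  · rw [sRep_pos _ (by omega)]
    simp [show P.1 > P.2.1 by omega]
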